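-- pv_equiv track=rewrite | github.com/gosch/Katas-in-python | 2019/Mar/giftSafety.py | giftSafety
-- ===== SOURCE A (Python) =====
-- import itertools
--
-- def giftSafety(gift):
--     r = 0
--     for i in range(0, len(gift) - 2):
--         c = 0
--         c_per = gift[i:i + 3]
--         for per in itertools.permutations(c_per):
--             if ''.join(per) == c_per:
--                 c += 1
--             if c == 2:
--                 r += 1
--                 break
--     return r
-- ===== SOURCE B (Python) =====
-- def giftSafety(gift):
--     return sum(1 for i in range(len(gift) - 2) if len(set(gift[i:i + 3])) < 3)
-- ===== Notes on version B (the rewrite author's own statement) =====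
-- stated objective: simpler
-- what changed: Replaces the inner loop over all 6 itertools.permutations of each 3-char window (counting permutations that re-join to the window) with a direct duplicate test len(set(window)) < 3, summing a boolean over the sliding windows.
import Mathlib
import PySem

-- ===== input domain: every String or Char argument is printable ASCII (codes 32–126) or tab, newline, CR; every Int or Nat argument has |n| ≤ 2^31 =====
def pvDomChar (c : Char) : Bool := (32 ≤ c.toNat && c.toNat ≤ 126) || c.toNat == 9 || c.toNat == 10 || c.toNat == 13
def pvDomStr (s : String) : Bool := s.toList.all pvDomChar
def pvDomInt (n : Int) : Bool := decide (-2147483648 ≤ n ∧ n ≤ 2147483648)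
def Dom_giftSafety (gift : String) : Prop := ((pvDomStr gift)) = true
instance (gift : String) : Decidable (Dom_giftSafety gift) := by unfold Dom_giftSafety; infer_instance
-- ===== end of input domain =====

-- B replaces A's permutation-matching inner loop with a direct duplicate test on each 3-char window (simpler).

-- ===== PORT A =====
-- inner 'for per in itertools.permutations(c_per)' loop with its early break at c == 2;
-- ''.join(per) == c_per is compared as the equality of the char lists (exact: per is a tuple of single chars)
def gsInner (w : List Char) : List (List Char) → Int → Int → Int
  | [], _, r => r
  | per :: rest, c, r =>
    let c' := if per == w then c + 1 else c
    if c' == 2 then r + 1 else gsInner w rest c' r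

def giftSafety (gift : String) : Int :=
  (PySem.List.pyRange 0 (PySem.Str.len gift - 2) 1).foldl
    (fun r i =>
      let c_per := (PySem.Str.slice gift (some i) (some (i + 3))).toList
      gsInner c_per (PySem.List.permutations c_per c_per.length) 0 r) 0

-- ===== PORT B =====
def giftSafety_alt (gift : String) : Int :=
  ((PySem.List.pyRange 0 (PySem.Str.len gift - 2) 1).map
    (fun i =>
      if PySem.Set.len (PySem.Set.ofList (PySem.Str.slice gift (some i) (some (i + 3))).toList) < 3
      then (1 : Int) else 0)).sum

-- ===== PRECONDITION & SPEC =====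
def Spec_giftSafety (gift : String) (out : Int) : Prop := out = giftSafety_alt gift
instance (gift : String) (out : Int) : Decidable (Spec_giftSafety gift out) := by unfold Spec_giftSafety; infer_instance

-- ===== CLAIM (what is proved, stated in full; the proofs are below) =====
def Claim_equal_giftSafety : Prop := ∀ (gift : String), Dom_giftSafety gift → Spec_giftSafety gift (giftSafety gift)

-- ===== LEMMAS AND PROOFS =====

-- the inner permutation loop adds 1 to r exactly when the 3-char window has a repeated character
lemma gsInner_eq (a b c : Char) (r : Int) :
    gsInner [a, b, c] (PySem.List.permutations [a, b, c] 3) 0 r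
      = r + (if PySem.Set.len (PySem.Set.ofList [a, b, c]) < 3 then (1 : Int) else 0) := by
  by_cases hab : a = b <;> by_cases hac : a = c <;> by_cases hbc : b = c <;>
    simp_all [PySem.List.permutations, gsInner, PySem.Set.ofList, PySem.Set.add,
      PySem.Set.contains, PySem.Set.len, List.range_succ, beq_iff_eq] <;>
    split_ifs <;> simp_all ; rcases ‹c = a ∨ c = b› with h | h <;> simp_all

-- a window of exactly 3 chars when 0 ≤ i and i + 3 ≤ len
lemma window_len (gift : String) (i : Int) (h0 : 0 ≤ i) (h3 : i + 3 ≤ (gift.toList.length : Int)) :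
    ((PySem.Str.slice gift (some i) (some (i + 3))).toList).length = 3 := by
  rw [PySem.Str.toList_slice]
  rw [show PySem.Chars.slice gift.toList (some i) (some (i + 3))
        = PySem.List.slice gift.toList (some i) (some (i + 3)) from rfl]
  rw [PySem.List.slice_toNat]
  simp [List.length_take, List.length_drop]
  have := @String.length_toList gift
  omega
  all_goals omega

theorem giftSafety_spec : Claim_equal_giftSafety := by
  intro gift _
  unfold Spec_giftSafety giftSafety giftSafety_alt
  rw [PySem.List.foldl_congr_mem
        (g := fun (r : Int) (i : Int) =>
          r + (if PySem.Set.len (PySem.Set.ofList (PySem.Str.slice gift (some i) (some (i + 3))).toList) < 3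
               then (1 : Int) else 0))]
  · rw [PySem.List.foldl_add]
    simp
  · intro r i hi
    rw [PySem.List.mem_pyRange_one] at hi
    have hlen : ((PySem.Str.slice gift (some i) (some (i + 3))).toList).length = 3 := by
      apply window_len gift i hi.1
      have := hi.2
      simp [PySem.Str.len_eq] at this ⊢
      omega
    obtain ⟨a, b, c, habc⟩ := List.length_eq_three.mp hlen
    simp only [habc]
    exact gsInner_eq a b c r
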